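-- pv_equiv track=rewrite | github.com/jenjane118/tnseq_pro | scripts/tnseq_pro.py | ta_sites_to_dict
-- ===== SOURCE A (Python) =====
-- def ta_sites_to_dict(ta_sites, read_count_dict):
--     """
--     Function to create wig file of insertions
--     Input               ta_sites                ordered list of all possible ta sites in Mbovis genome
--                         read_count_dict         dictionary of ta sites with insertions and read counts
--     Output              wig_dict                dict of insertions
--
--     """
--     wig_dict = {}
--     for site in ta_sites:
--         if site in read_count_dict:
--             count = read_count_dict[site]
--         else:
--             count = 0
--         wig_dict[site] = count
--     return wig_dict
-- ===== SOURCE B (Python) =====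
-- def ta_sites_to_dict(ta_sites, read_count_dict):
--     """Reversed traversal: default every TA site to 0, then overwrite from the read counts."""
--     wig_dict = {site: 0 for site in ta_sites}
--     site_set = set(ta_sites)
--     for site, count in read_count_dict.items():
--         if site in site_set:
--             wig_dict[site] = count
--     return wig_dict
-- ===== Notes on version B (the rewrite author's own statement) =====
-- stated objective: alternative
-- what changed: Instead of scanning ta_sites and looking each site up in read_count_dict, B first defaults every site to 0 and then scans read_count_dict once, overwriting the entries whose key is a TA site (set membership). Pre_ excludes association lists whose read_count_dict has duplicate keys, which no Python dict can produce (a real dict collapses them, so both Pythons agree); on such raw lists A's port would read the first binding while B's port keeps the last.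
import Mathlib
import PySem

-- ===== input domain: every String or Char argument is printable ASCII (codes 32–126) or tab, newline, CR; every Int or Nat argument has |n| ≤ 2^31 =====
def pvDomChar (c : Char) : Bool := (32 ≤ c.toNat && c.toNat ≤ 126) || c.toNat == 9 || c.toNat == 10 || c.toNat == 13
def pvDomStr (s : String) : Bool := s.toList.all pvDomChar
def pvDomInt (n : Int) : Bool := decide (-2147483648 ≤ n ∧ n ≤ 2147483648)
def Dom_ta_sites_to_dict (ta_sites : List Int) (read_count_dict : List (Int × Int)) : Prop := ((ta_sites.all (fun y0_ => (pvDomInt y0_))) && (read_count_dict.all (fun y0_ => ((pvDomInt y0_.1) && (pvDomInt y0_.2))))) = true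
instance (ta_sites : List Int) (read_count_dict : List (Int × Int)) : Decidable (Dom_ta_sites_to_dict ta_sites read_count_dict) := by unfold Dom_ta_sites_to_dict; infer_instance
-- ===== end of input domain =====

-- B reverses the traversal: it defaults every TA site to 0 and then scans the read counts once,
-- overwriting the entries whose key is a TA site (objective: alternative decomposition, same cost).

-- ===== PORT A =====
-- for each site, look it up in the read-count dict (0 if absent) and store it
def ta_sites_to_dict (ta_sites : List Int) (read_count_dict : List (Int × Int)) : List (Int × Int) :=
  (ta_sites.foldl
    (fun (wig_dict : PySem.Dict Int Int) site =>
      let count : Int :=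
        match (PySem.Dict.mk read_count_dict).get? site with
        | some c => c
        | none => 0
      wig_dict.insert site count)
    PySem.Dict.empty).items

-- ===== PORT B =====
-- default every site to 0, then one pass over the read counts overwriting the TA sites
def ta_sites_to_dict_alt (ta_sites : List Int) (read_count_dict : List (Int × Int)) : List (Int × Int) :=
  let wig0 : PySem.Dict Int Int :=
    ta_sites.foldl (fun d site => d.insert site 0) PySem.Dict.empty
  let site_set : PySem.Set Int := PySem.Set.ofList ta_sites
  (read_count_dict.foldl
    (fun (d : PySem.Dict Int Int) p =>
      if PySem.Set.contains site_set p.1 then d.insert p.1 p.2 else d)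
    wig0).items

-- ===== PRECONDITION & SPEC =====
-- Pre_ excludes association lists whose read_count_dict has duplicate keys: no Python dict can
-- produce them (a real dict collapses duplicates, so both Pythons agree); on such raw lists A's
-- port reads the first binding while B's port keeps the last — an artefact of the representation.
def Pre_ta_sites_to_dict (ta_sites : List Int) (read_count_dict : List (Int × Int)) : Prop :=
  (read_count_dict.map Prod.fst).Nodup
instance (ta_sites : List Int) (read_count_dict : List (Int × Int)) : Decidable (Pre_ta_sites_to_dict ta_sites read_count_dict) := by unfold Pre_ta_sites_to_dict; infer_instance

def pvWitness_ta_sites_to_dict : List Int × (List (Int × Int)) := ([10, 25, 10, 40], [(25, 7), (99, 3)])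

def Spec_ta_sites_to_dict (ta_sites : List Int) (read_count_dict : List (Int × Int)) (out : List (Int × Int)) : Prop := out = ta_sites_to_dict_alt ta_sites read_count_dict
instance (ta_sites : List Int) (read_count_dict : List (Int × Int)) (out : List (Int × Int)) : Decidable (Spec_ta_sites_to_dict ta_sites read_count_dict out) := by unfold Spec_ta_sites_to_dict; infer_instance

-- ===== CLAIM (what is proved, stated in full; the proofs are below) =====
def Claim_equal_ta_sites_to_dict : Prop := ∀ (ta_sites : List Int) (read_count_dict : List (Int × Int)), Dom_ta_sites_to_dict ta_sites read_count_dict → Pre_ta_sites_to_dict ta_sites read_count_dict → Spec_ta_sites_to_dict ta_sites read_count_dict (ta_sites_to_dict ta_sites read_count_dict)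

-- ===== LEMMAS AND PROOFS =====

-- an insert loop over ts with value g s produces exactly the deduplicated sites paired with g
theorem pv_insert_loop_items (g : Int → Int) (ts : List Int) :
    (ts.foldl (fun (d : PySem.Dict Int Int) s => d.insert s (g s)) PySem.Dict.empty).items
      = (PySem.Set.ofList ts).map (fun k => (k, g k)) := by
  induction ts using List.reverseRecOn with
  | nil => rfl
  | append_singleton ts s ih =>
    have hkeys : (ts.foldl (fun (d : PySem.Dict Int Int) x => d.insert x (g x)) PySem.Dict.empty).keys
        = PySem.Set.ofList ts := by
      rw [PySem.Dict.keys_foldl_insert, PySem.Dict.keys_empty, PySem.Set.update, ← PySem.Set.ofList_eq_foldl]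
    rw [List.foldl_append, List.foldl_cons, List.foldl_nil, PySem.Dict.items_insert,
        PySem.Dict.contains_eq_decide_mem_keys, hkeys, ih]
    have hofl : PySem.Set.ofList (ts ++ [s]) = PySem.Set.add (PySem.Set.ofList ts) s := by
      rw [PySem.Set.ofList_eq_foldl, List.foldl_append, ← PySem.Set.ofList_eq_foldl]
      rfl
    by_cases hs : s ∈ PySem.Set.ofList ts
    · simp only [hs, decide_true, if_true]
      have hadd : PySem.Set.add (PySem.Set.ofList ts) s = PySem.Set.ofList ts := by
        simp [PySem.Set.add, PySem.Set.contains, hs]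
      rw [hofl, hadd, List.map_map]
      apply List.map_congr_left
      intro k hk
      by_cases hks : k = s
      · subst hks; simp
      · simp [hks]
    · simp only [hs, decide_false, Bool.false_eq_true, if_false]
      have hadd : PySem.Set.add (PySem.Set.ofList ts) s = PySem.Set.ofList ts ++ [s] := by
        simp [PySem.Set.add, PySem.Set.contains, hs]
      rw [hofl, hadd, List.map_append]; rfl

-- overwrite loop: fold over rcd with insert-if-member, starting from S.map (k, h k)
theorem pv_overwrite_loop_items (ts : List Int) (rcd : List (Int × Int)) (h : Int → Int)
    (hnd : (rcd.map Prod.fst).Nodup) :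
    (rcd.foldl
      (fun (d : PySem.Dict Int Int) p =>
        if PySem.Set.contains (PySem.Set.ofList ts) p.1 then d.insert p.1 p.2 else d)
      (PySem.Dict.mk ((PySem.Set.ofList ts).map (fun k => (k, h k))))).items
      = (PySem.Set.ofList ts).map (fun k => (k, (PySem.Dict.mk rcd).getD k (h k))) := by
  induction rcd generalizing h with
  | nil =>
    simp only [List.foldl_nil]
    apply List.map_congr_left
    intro k hk
    simp [PySem.Dict.getD, PySem.Dict.get?]
  | cons p rest ih =>
    obtain ⟨k, v⟩ := p
    simp only [List.map_cons, List.nodup_cons] at hnd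
    rw [List.foldl_cons]
    by_cases hk : k ∈ PySem.Set.ofList ts
    · have hc : PySem.Set.contains (PySem.Set.ofList ts) k = true := by
        simp [PySem.Set.contains, hk]
      simp only [hc, if_true]
      have hins : (PySem.Dict.mk ((PySem.Set.ofList ts).map (fun x => (x, h x)))).insert k v
          = PySem.Dict.mk ((PySem.Set.ofList ts).map (fun x => (x, if x = k then v else h x))) := by
        apply PySem.Dict.ext
        rw [PySem.Dict.items_insert]
        have hck : (PySem.Dict.mk ((PySem.Set.ofList ts).map (fun x => (x, h x)))).contains k = true := by
          rw [PySem.Dict.contains_eq_decide_mem_keys]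
          simp only [PySem.Dict.keys, decide_eq_true_iff, List.map_map]
          exact List.mem_map.2 ⟨k, hk, rfl⟩
        rw [if_pos hck]
        simp only [List.map_map]
        apply List.map_congr_left
        intro x hx
        by_cases hxk : x = k
        · subst hxk; simp
        · simp [hxk]
      rw [hins, ih _ hnd.2]
      apply List.map_congr_left
      intro x hx
      by_cases hxk : x = k
      · subst hxk
        have hnc : ({ items := rest } : PySem.Dict Int Int).get? x = none := by
          rw [PySem.Dict.get?_eq_none_iff_not_mem_keys]
          simpa [PySem.Dict.keys] using hnd.1
        simp [PySem.Dict.getD_eq_get?_getD, PySem.Dict.get?_mk_cons, hnc]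
      · simp [PySem.Dict.getD_eq_get?_getD, PySem.Dict.get?_mk_cons, Ne.symm hxk, hxk]
    · have hc : PySem.Set.contains (PySem.Set.ofList ts) k = false := by
        simp [PySem.Set.contains, hk]
      simp only [hc, Bool.false_eq_true, if_false]
      rw [ih _ hnd.2]
      apply List.map_congr_left
      intro x hx
      have hxk : x ≠ k := fun e => hk (e ▸ hx)
      simp [PySem.Dict.getD_eq_get?_getD, PySem.Dict.get?_mk_cons, Ne.symm hxk]

-- ===== VERDICT (by name: the statement is the Claim_ definition above) =====
theorem ta_sites_to_dict_spec : Claim_equal_ta_sites_to_dict := by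
  intro ts rcd _hdom hpre
  unfold Spec_ta_sites_to_dict ta_sites_to_dict ta_sites_to_dict_alt
  have hA : (ts.foldl
      (fun (wig : PySem.Dict Int Int) site =>
        let count : Int :=
          match (PySem.Dict.mk rcd).get? site with
          | some c => c
          | none => 0
        wig.insert site count) PySem.Dict.empty)
      = ts.foldl (fun (d : PySem.Dict Int Int) s => d.insert s ((PySem.Dict.mk rcd).getD s 0)) PySem.Dict.empty := by
    apply PySem.List.foldl_congr_mem
    intro d s _
    simp only [PySem.Dict.getD_eq_get?_getD]
    cases (PySem.Dict.mk rcd).get? s <;> rfl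
  rw [hA, pv_insert_loop_items (fun s => (PySem.Dict.mk rcd).getD s 0) ts]
  have hw0 : (ts.foldl (fun (d : PySem.Dict Int Int) site => d.insert site 0) PySem.Dict.empty)
      = PySem.Dict.mk ((PySem.Set.ofList ts).map (fun k => (k, (0 : Int)))) := by
    apply PySem.Dict.ext
    exact pv_insert_loop_items (fun _ => 0) ts
  rw [hw0, pv_overwrite_loop_items ts rcd (fun _ => 0) hpre]
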